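-- pv_equiv track=rewrite | github.com/volcengine/verl | atropos/environments/intern_bootcamp/internbootcamp_lib/internbootcamp/libs/bbeh_multistep_arithmetic/multistep_arithmetic.py | validate_expression_structure
-- ===== SOURCE A (Python) =====
-- OPERATORS = ['+', '-', '*', '/', '><', ';', '@', '<>', '[]', '#', '!', '~', '&', ':', '][']
--
-- def validate_expression_structure(tokens):
--     """验证表达式的结构是否合法"""
--     stack = []
--     operand_count = 0
--     operator_count = 0
--
--     for token in tokens:
--         if token == '(':
--             stack.append(token)
--         elif token == ')':
--             if not stack:
--                 return False
--             stack.pop()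
--         elif token in OPERATORS:
--             operator_count += 1
--         else:
--             operand_count += 1
--
--     # 检查括号是否匹配
--     if stack:
--         return False
--
--     # 检查操作数和操作符的数量关系
--     # 对于二元运算符，操作数应该比操作符多1
--     return operand_count == operator_count + 1
-- ===== SOURCE B (Python) =====
-- OPERATORS = ['+', '-', '*', '/', '><', ';', '@', '<>', '[]', '#', '!', '~', '&', ':', '][']
--
-- def validate_expression_structure(tokens):
--     """验证表达式的结构是否合法"""
--     deltas = [1 if t == '(' else -1 if t == ')' else 0 for t in tokens]
--     prefixes = []
--     s = 0
--     for d in deltas: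
--         s += d
--         prefixes.append(s)
--     balanced = min(prefixes, default=0) >= 0 and (prefixes[-1] if prefixes else 0) == 0
--     operand_count = sum(1 for t in tokens if t not in ('(', ')') and t not in OPERATORS)
--     operator_count = sum(1 for t in tokens if t in OPERATORS)
--     return balanced and operand_count == operator_count + 1
-- ===== Notes on version B (the rewrite author's own statement) =====
-- stated objective: alternative
-- what changed: Replaces the stack-based short-circuiting scan with a balance-delta prefix-sum table (validated by min>=0 and final sum 0) plus separate comprehension tallies for operands and operators.
import Mathlib
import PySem

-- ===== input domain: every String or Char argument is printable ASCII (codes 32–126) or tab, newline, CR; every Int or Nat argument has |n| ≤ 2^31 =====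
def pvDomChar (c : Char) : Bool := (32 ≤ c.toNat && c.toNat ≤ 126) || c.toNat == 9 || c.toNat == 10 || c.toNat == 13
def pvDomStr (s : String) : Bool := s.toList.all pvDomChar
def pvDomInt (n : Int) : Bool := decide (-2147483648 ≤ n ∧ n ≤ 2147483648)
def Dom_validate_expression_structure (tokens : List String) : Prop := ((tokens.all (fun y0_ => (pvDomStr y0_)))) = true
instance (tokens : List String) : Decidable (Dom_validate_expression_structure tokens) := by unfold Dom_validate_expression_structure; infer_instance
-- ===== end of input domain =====

-- B replaces A's stack-based short-circuiting scan by a balance-delta prefix-sum table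
-- (min ≥ 0 and final sum 0) plus separate filter tallies; alternative decomposition, same cost.

-- ===== PORT A =====
def OPERATORS : List String := ["+", "-", "*", "/", "><", ";", "@", "<>", "[]", "#", "!", "~", "&", ":", "]["]

-- the for-loop of A: state (stack, operand_count, operator_count); early `return False` = result false
def vesLoop : List String → List String → Int → Int → Bool
  | [], stack, opd, opr =>
      -- after the loop: `if stack: return False`, then the count relation
      if stack.isEmpty then decide (opd = opr + 1) else false
  | t :: ts, stack, opd, opr =>
      if t = "(" then vesLoop ts (stack ++ [t]) opd opr
      else if t = ")" then
        (if stack.isEmpty then false else vesLoop ts stack.dropLast opd opr)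
      else if OPERATORS.contains t then vesLoop ts stack opd (opr + 1)
      else vesLoop ts stack (opd + 1) opr

def validate_expression_structure (tokens : List String) : Bool :=
  vesLoop tokens [] 0 0

-- ===== PORT B =====
def validate_expression_structure_alt (tokens : List String) : Bool :=
  let deltas : List Int := tokens.map (fun t => if t = "(" then (1 : Int) else if t = ")" then -1 else 0)
  -- the accumulation loop building the running prefix sums
  let prefixes := (deltas.foldl (fun (acc : List Int × Int) d => (acc.1 ++ [acc.2 + d], acc.2 + d)) (([] : List Int), 0)).1
  let balanced := decide (0 ≤ prefixes.min?.getD 0) && (prefixes.getLast?.getD 0 == 0)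
  let operand_count := (tokens.filter (fun t => !(t == "(" || t == ")") && !(OPERATORS.contains t))).length
  let operator_count := (tokens.filter (fun t => OPERATORS.contains t)).length
  balanced && decide (operand_count = operator_count + 1)

-- ===== PRECONDITION & SPEC =====
def Spec_validate_expression_structure (tokens : List String) (out : Bool) : Prop := out = validate_expression_structure_alt tokens
instance (tokens : List String) (out : Bool) : Decidable (Spec_validate_expression_structure tokens out) := by unfold Spec_validate_expression_structure; infer_instance

-- ===== CLAIM (what is proved, stated in full; the proofs are below) =====
def Claim_equal_validate_expression_structure : Prop := ∀ (tokens : List String), Dom_validate_expression_structure tokens → Spec_validate_expression_structure tokens (validate_expression_structure tokens)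

-- ===== LEMMAS AND PROOFS =====

-- balance delta of a token
def vesDelta (t : String) : Int := if t = "(" then 1 else if t = ")" then -1 else 0

-- the prefix sums of a delta list, starting from s
def vesPref (s : Int) : List Int → List Int
  | [] => []
  | d :: ds => (s + d) :: vesPref (s + d) ds

-- pure paren-balance check starting from height h
def vesOk (h : Int) : List String → Bool
  | [] => h == 0
  | t :: ts =>
      if t = "(" then vesOk (h + 1) ts
      else if t = ")" then (!(h == 0)) && vesOk (h - 1) ts
      else vesOk h ts

def vesOpd (ts : List String) : Nat :=
  (ts.filter (fun t => !(t == "(" || t == ")") && !(OPERATORS.contains t))).length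

def vesOpr (ts : List String) : Nat :=
  (ts.filter (fun t => OPERATORS.contains t)).length

lemma vesPref_fold (ds : List Int) (acc : List Int) (s : Int) :
    (ds.foldl (fun (acc : List Int × Int) d => (acc.1 ++ [acc.2 + d], acc.2 + d)) (acc, s)).1
      = acc ++ vesPref s ds := by
  induction ds generalizing acc s with
  | nil => simp [vesPref]
  | cons d ds ih => simp [List.foldl, vesPref, ih]

lemma vesMin_all (l : List Int) (dflt : Int) (hd : 0 ≤ dflt) :
    decide (0 ≤ l.min?.getD dflt) = l.all (fun p => decide (0 ≤ p)) := by
  rcases h : l.min? with _ | m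
  · rw [List.min?_eq_none_iff] at h
    subst h
    simpa using hd
  · obtain ⟨hmem, hle⟩ := (List.min?_eq_some_iff).mp h
    rw [Bool.eq_iff_iff]
    simp only [Option.getD_some, decide_eq_true_eq, List.all_eq_true]
    constructor
    · intro h0 p hp
      exact le_trans h0 (hle p hp)
    · intro hall
      exact hall m hmem

lemma vesGetLast_cons (a x : Int) (l : List Int) :
    (a :: l).getLast?.getD x = l.getLast?.getD a := by
  cases l with
  | nil => simp
  | cons b l =>
      rw [List.getLast?_cons_cons]
      rcases h : (b :: l).getLast? with _ | v
      · simp at h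
      · simp

-- the balance check equals the prefix-sum criterion
lemma vesOk_pref (ts : List String) (h : Int) (hh : 0 ≤ h) :
    vesOk h ts
      = ((vesPref h (ts.map vesDelta)).all (fun p => decide (0 ≤ p))
          && ((vesPref h (ts.map vesDelta)).getLast?.getD h == 0)) := by
  induction ts generalizing h with
  | nil => simp [vesOk, vesPref]
  | cons t ts ih =>
      simp only [List.map_cons, vesPref, List.all_cons, vesOk, vesGetLast_cons]
      by_cases h1 : t = "("
      · have hd : vesDelta t = 1 := by simp [vesDelta, h1]
        rw [hd, if_pos h1, ih (h + 1) (by omega)]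
        have e : decide (0 ≤ h + 1) = true := by simp; omega
        simp [e]
      · by_cases h2 : t = ")"
        · have hd : vesDelta t = -1 := by simp [vesDelta, h1, h2]
          rw [hd, if_neg h1, if_pos h2]
          have e : h + -1 = h - 1 := by ring
          rw [e]
          by_cases h0 : h = 0
          · subst h0
            have e2 : decide ((0:Int) ≤ 0 - 1) = false := by simp
            simp [e2]
          · rw [ih (h - 1) (by omega)]
            have e1 : (!(h == 0)) = true := by simp [h0]
            simp [e1, show (1:Int) ≤ h by omega, show (0:Int) ≤ h - 1 by omega]
        · have hd : vesDelta t = 0 := by simp [vesDelta, h1, h2]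
          rw [hd, if_neg h1, if_neg h2, add_zero, ih h hh]
          have e : decide (0 ≤ h) = true := by simpa using hh
          simp [e]

-- A's loop in terms of the balance check and the tallies
lemma vesLoop_eq (ts : List String) (stack : List String) (opd opr : Int) :
    vesLoop ts stack opd opr
      = (vesOk (stack.length : Int) ts
          && decide (opd + (vesOpd ts : Int) = opr + (vesOpr ts : Int) + 1)) := by
  induction ts generalizing stack opd opr with
  | nil =>
      rcases stack with _ | ⟨s, stack⟩
      · simp [vesLoop, vesOk, vesOpd, vesOpr]
      · simp only [vesLoop, vesOk, vesOpd, vesOpr, List.isEmpty_cons]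
        have : (((s :: stack).length : Int) == 0) = false := by
          simp only [List.length_cons, beq_eq_false_iff_ne, ne_eq]
          push_cast; omega
        simp [this]
        omega
  | cons t ts ih =>
      by_cases h1 : t = "("
      · subst h1
        have step : vesLoop ("(" :: ts) stack opd opr = vesLoop ts (stack ++ ["("]) opd opr := by
          simp [vesLoop]
        have hlen : ((stack ++ ["("]).length : Int) = (stack.length : Int) + 1 := by
          simp
        have hok : vesOk ((stack.length : Int)) ("(" :: ts) = vesOk ((stack.length : Int) + 1) ts := by
          simp [vesOk]
        have hopd : vesOpd ("(" :: ts) = vesOpd ts := by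
          simp [vesOpd, List.filter_cons]
        have hopr : vesOpr ("(" :: ts) = vesOpr ts := by
          simp [vesOpr, List.filter_cons, OPERATORS]
        rw [step, ih, hlen, hok, hopd, hopr]
      · by_cases h2 : t = ")"
        · subst h2
          have hopd : vesOpd (")" :: ts) = vesOpd ts := by
            simp [vesOpd, List.filter_cons]
          have hopr : vesOpr (")" :: ts) = vesOpr ts := by
            simp [vesOpr, List.filter_cons, OPERATORS]
          rcases stack with _ | ⟨s, stack⟩
          · simp [vesLoop, vesOk]
          · have step : vesLoop (")" :: ts) (s :: stack) opd opr
                = vesLoop ts ((s :: stack).dropLast) opd opr := by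
              simp [vesLoop]
            have hlen : ((((s :: stack).dropLast).length : Int)) = (stack.length : Int) := by
              simp
            have hok : vesOk (((s :: stack).length : Int)) (")" :: ts) = vesOk ((stack.length : Int)) ts := by
              have h0 : ¬(((stack.length : Int)) + 1 = 0) := by omega
              have e : ((stack.length : Int)) + 1 - 1 = (stack.length : Int) := by omega
              simp only [List.length_cons]
              push_cast
              simp [vesOk, h0, e]
            rw [step, ih, hlen, hok, hopd, hopr]
        · by_cases h3 : OPERATORS.contains t = true
          · have h3m : t ∈ OPERATORS := by simpa using h3
            have step : vesLoop (t :: ts) stack opd opr = vesLoop ts stack opd (opr + 1) := by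
              simp [vesLoop, h1, h2, h3m]
            have hok : vesOk ((stack.length : Int)) (t :: ts) = vesOk ((stack.length : Int)) ts := by
              simp [vesOk, h1, h2]
            have hopd : vesOpd (t :: ts) = vesOpd ts := by
              simp [vesOpd, List.filter_cons, h3m]
            have hopr : vesOpr (t :: ts) = vesOpr ts + 1 := by
              simp [vesOpr, List.filter_cons, h3m]
            rw [step, ih, hok, hopd, hopr]
            refine congrArg₂ (· && ·) rfl ?_
            rw [decide_eq_decide]
            push_cast
            omega
          · have h3' : OPERATORS.contains t = false := by simpa using h3
            have h3m : t ∉ OPERATORS := by simpa using h3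
            have step : vesLoop (t :: ts) stack opd opr = vesLoop ts stack (opd + 1) opr := by
              simp [vesLoop, h1, h2, h3m]
            have hok : vesOk ((stack.length : Int)) (t :: ts) = vesOk ((stack.length : Int)) ts := by
              simp [vesOk, h1, h2]
            have hopd : vesOpd (t :: ts) = vesOpd ts + 1 := by
              simp [vesOpd, List.filter_cons, h1, h2, h3m]
            have hopr : vesOpr (t :: ts) = vesOpr ts := by
              simp [vesOpr, List.filter_cons, h3m]
            rw [step, ih, hok, hopd, hopr]
            refine congrArg₂ (· && ·) rfl ?_
            rw [decide_eq_decide]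
            push_cast
            omega

-- ===== VERDICT (by name: the statement is the Claim_ definition above) =====
theorem validate_expression_structure_spec : Claim_equal_validate_expression_structure := by
  intro tokens _
  unfold Spec_validate_expression_structure validate_expression_structure validate_expression_structure_alt
  dsimp only
  have hmap : tokens.map (fun t => if t = "(" then (1:Int) else if t = ")" then -1 else 0)
      = tokens.map vesDelta := by
    simp [vesDelta]
  rw [vesLoop_eq, vesPref_fold, List.nil_append, vesMin_all _ 0 le_rfl, hmap]
  simp only [List.length_nil, Nat.cast_zero]
  rw [vesOk_pref tokens 0 le_rfl]
  simp only [vesOpd, vesOpr]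
  refine congrArg₂ (· && ·) rfl ?_
  rw [decide_eq_decide]
  omega
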